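-- pv_equiv track=rewrite | github.com/Meherkandukuri/GoLearning | PythonLearning/RoasterManagementSystem.py | detect_repeating_pattern
-- ===== SOURCE A (Python) =====
-- def detect_repeating_pattern(sequence):
--     """Detect repeating patterns in a sequence"""
--     max_pattern_length = min(14, len(sequence))  # Look for patterns up to 14 days
--     best_pattern = None
--     best_score = 0
--
--     # Try different pattern lengths
--     for pattern_length in range(3, max_pattern_length + 1):
--         # Check if sequence is multiple of pattern length
--         if len(sequence) % pattern_length != 0:
--             continue
--
--         pattern = sequence[:pattern_length]
--         repetitions = len(sequence) // pattern_length
--         match = True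
--
--         # Verify pattern repeats throughout
--         for i in range(1, repetitions):
--             start = i * pattern_length
--             end = start + pattern_length
--             if sequence[start:end] != pattern:
--                 match = False
--                 break
--
--         if match:
--             # Calculate confidence based on pattern length and repetitions
--             score = pattern_length * repetitions
--             if score > best_score:
--                 best_score = score
--                 best_pattern = pattern
--
--     return best_pattern
-- ===== SOURCE B (Python) =====
-- def detect_repeating_pattern(sequence):
--     """Detect repeating patterns in a sequence"""
--     # Every valid tiling scores exactly len(sequence), so A's strict '>' keeps the
--     # first valid pattern length: return the first length whose tiling reproduces
--     # the sequence.
--     n = len(sequence)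
--     for pattern_length in range(3, min(14, n) + 1):
--         if n % pattern_length == 0 and sequence[:pattern_length] * (n // pattern_length) == sequence:
--             return sequence[:pattern_length]
--     return None
-- ===== Notes on version B (the rewrite author's own statement) =====
-- stated objective: simpler
-- what changed: Every valid tiling scores exactly len(sequence), so A's strict '>' keeps the first valid length; B drops the score variable, the best-pattern tracking and the inner slice-verification loop, returning the first pattern length whose replication sequence[:pl]*(n//pl) equals the sequence.
import Mathlib
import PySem

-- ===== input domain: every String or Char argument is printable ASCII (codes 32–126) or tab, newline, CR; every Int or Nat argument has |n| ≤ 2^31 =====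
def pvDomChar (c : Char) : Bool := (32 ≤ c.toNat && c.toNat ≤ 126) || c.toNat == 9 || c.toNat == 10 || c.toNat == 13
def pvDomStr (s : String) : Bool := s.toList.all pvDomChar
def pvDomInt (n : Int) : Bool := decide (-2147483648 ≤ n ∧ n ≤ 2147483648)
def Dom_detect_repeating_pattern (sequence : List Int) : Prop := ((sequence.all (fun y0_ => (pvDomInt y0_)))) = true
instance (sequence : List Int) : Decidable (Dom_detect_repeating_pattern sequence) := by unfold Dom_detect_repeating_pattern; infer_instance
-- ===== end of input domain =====

-- B replaces A's best-score tracking and inner slice-verification loop by returning the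
-- first pattern length whose tiling reproduces the sequence (objective: simpler).

-- ===== PORT A =====
-- inner verification loop ('for i in range(1, repetitions)' with break)
def pvVerifyA (sequence pattern : List Int) (pattern_length : Int) : List Int → Bool
  | [] => true
  | i :: rest =>
    let start := i * pattern_length
    let stop := start + pattern_length
    if PySem.List.slice sequence (some start) (some stop) ≠ pattern then false
    else pvVerifyA sequence pattern pattern_length rest

-- loop body of A's outer 'for pattern_length in range(3, max_pattern_length + 1)'
def pvStepA (sequence : List Int) (best : Option (List Int) × Int) (pattern_length : Int) :
    Option (List Int) × Int :=
  if PySem.Int.mod (sequence.length : Int) pattern_length ≠ 0 then best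
  else
    let pattern := PySem.List.slice sequence none (some pattern_length)
    let repetitions := PySem.Int.floordiv (sequence.length : Int) pattern_length
    let mtch := pvVerifyA sequence pattern pattern_length (PySem.List.pyRange 1 repetitions 1)
    if mtch then
      let score := pattern_length * repetitions
      if score > best.2 then (some pattern, score) else best
    else best

def detect_repeating_pattern (sequence : List Int) : Option (List Int) :=
  let max_pattern_length : Int := min 14 (sequence.length : Int)
  (((PySem.List.pyRange 3 (max_pattern_length + 1) 1).foldl (pvStepA sequence)
      ((none : Option (List Int)), (0 : Int)))).1

-- ===== PORT B =====
-- B's loop with early return: first pattern length whose tiling reproduces the sequence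
def pvFirstTiling (sequence : List Int) (n : Int) : List Int → Option (List Int)
  | [] => none
  | pattern_length :: rest =>
    if PySem.Int.mod n pattern_length == 0 &&
       (List.replicate (PySem.Int.floordiv n pattern_length).toNat
          (PySem.List.slice sequence none (some pattern_length))).flatten == sequence then
      some (PySem.List.slice sequence none (some pattern_length))
    else pvFirstTiling sequence n rest

def detect_repeating_pattern_alt (sequence : List Int) : Option (List Int) :=
  let n : Int := (sequence.length : Int)
  pvFirstTiling sequence n (PySem.List.pyRange 3 (min 14 n + 1) 1)

-- ===== PRECONDITION & SPEC =====
def Spec_detect_repeating_pattern (sequence : List Int) (out : Option (List Int)) : Prop := out = detect_repeating_pattern_alt sequence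
instance (sequence : List Int) (out : Option (List Int)) : Decidable (Spec_detect_repeating_pattern sequence out) := by unfold Spec_detect_repeating_pattern; infer_instance

-- ===== CLAIM (what is proved, stated in full; the proofs are below) =====
def Claim_equal_detect_repeating_pattern : Prop := ∀ (sequence : List Int), Dom_detect_repeating_pattern sequence → Spec_detect_repeating_pattern sequence (detect_repeating_pattern sequence)

-- ===== LEMMAS AND PROOFS =====

lemma pv_verify_iff (s : List Int) (p r j : Nat) (hlen : s.length = r * p)
    (hj : j ≤ r) :
    (pvVerifyA s (s.take p) (p : Int) (PySem.List.pyRange (j : Int) (r : Int) 1) = true ↔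
      s.drop (j * p) = (List.replicate (r - j) (s.take p)).flatten) := by
  obtain ⟨d, hd⟩ : ∃ d, r = j + d := ⟨r - j, by omega⟩
  clear hj
  induction d generalizing j with
  | zero =>
    have hjr : j = r := by omega
    subst hjr
    rw [PySem.List.pyRange_one_eq_nil (le_refl _)]
    simp [pvVerifyA, List.drop_eq_nil_iff, hlen]
  | succ d ih =>
    have hjr : j < r := by omega
    rw [PySem.List.pyRange_one_cons (by exact_mod_cast hjr)]
    simp only [pvVerifyA]
    have hcast : (j : Int) + 1 = ((j + 1 : Nat) : Int) := by push_cast; ring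
    rw [hcast]
    have hslice : PySem.List.slice s (some ((j : Int) * (p : Int)))
        (some ((j : Int) * (p : Int) + (p : Int))) = (s.drop (j * p)).take p := by
      have h1 : ((j : Int) * (p : Int)) = ((j * p : Nat) : Int) := by push_cast; ring
      rw [h1, PySem.List.slice_natCast_add]
    rw [hslice]
    have hple : p ≤ r * p := Nat.le_mul_of_pos_left p (by omega)
    have hpat_len : (s.take p).length = p := by
      rw [List.length_take, hlen]; omega
    have hrj : r - j = (r - (j + 1)) + 1 := by omega
    rw [hrj]
    by_cases hEq : (s.drop (j * p)).take p = s.take p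
    · simp only [hEq, ne_eq, not_true_eq_false, if_false]
      rw [ih (j + 1) (by omega)]
      simp only [List.replicate_succ, List.flatten_cons]
      constructor
      · intro h
        have hsplit : s.drop (j * p) =
            (s.drop (j * p)).take p ++ (s.drop (j * p)).drop p :=
          (List.take_append_drop p _).symm
        rw [hsplit, hEq, List.drop_drop]
        have harith : j * p + p = (j + 1) * p := by ring
        rw [harith, h]
      · intro h
        have h2 := congrArg (List.drop p) h
        rw [List.drop_drop] at h2
        have harith : j * p + p = (j + 1) * p := by ring
        rw [harith, List.drop_left' hpat_len] at h2
        exact h2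
    · simp only [hEq, ne_eq, not_false_eq_true, if_true]
      simp only [List.replicate_succ, List.flatten_cons]
      constructor
      · intro h; simp at h
      · intro h
        exfalso
        apply hEq
        have := congrArg (List.take p) h
        rw [List.take_left' hpat_len] at this
        exact this

lemma pv_stay (s pat : List Int) (L : List Int) (hL : ∀ pl ∈ L, 0 < pl) :
    L.foldl (pvStepA s) (some pat, (s.length : Int)) = (some pat, (s.length : Int)) := by
  induction L with
  | nil => rfl
  | cons pl rest ih =>
    have hpl : 0 < pl := hL pl (by simp)
    have hrest : ∀ q ∈ rest, 0 < q := fun q hq => hL q (by simp [hq])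
    have hstep : pvStepA s (some pat, (s.length : Int)) pl = (some pat, (s.length : Int)) := by
      unfold pvStepA
      by_cases hm : PySem.Int.mod (s.length : Int) pl = 0
      · have hdvd : pl ∣ (s.length : Int) :=
          (PySem.Int.mod_eq_zero_iff_dvd _ _).mp hm
        have hfd : PySem.Int.floordiv (s.length : Int) pl = (s.length : Int) / pl :=
          PySem.Int.floordiv_eq_ediv_of_pos hpl
        have hscore : pl * ((s.length : Int) / pl) = (s.length : Int) :=
          Int.mul_ediv_cancel' hdvd
        simp only [hm, ne_eq, not_true_eq_false, if_false, hfd, hscore]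
        split <;> simp
      · simp [hm]
    simpa [List.foldl_cons, hstep] using ih hrest

-- main fold/find correspondence
lemma pv_main (s : List Int) (L : List Int)
    (hL : ∀ pl ∈ L, 3 ≤ pl ∧ pl ≤ (s.length : Int)) :
    (L.foldl (pvStepA s) ((none : Option (List Int)), (0 : Int))).1 =
      pvFirstTiling s (s.length : Int) L := by
  induction L with
  | nil => rfl
  | cons pl rest ih =>
    obtain ⟨h3, hle⟩ := hL pl (by simp)
    have hrest : ∀ q ∈ rest, 3 ≤ q ∧ q ≤ (s.length : Int) :=
      fun q hq => hL q (List.mem_cons_of_mem _ hq)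
    simp only [List.foldl_cons, pvFirstTiling]
    by_cases hm : PySem.Int.mod (s.length : Int) pl = 0
    · obtain ⟨p, rfl⟩ : ∃ p : Nat, pl = (p : Int) := ⟨pl.toNat, by omega⟩
      have h3' : 3 ≤ p := by exact_mod_cast h3
      have hlep : p ≤ s.length := by exact_mod_cast hle
      have hdvd : (p : Int) ∣ (s.length : Int) := (PySem.Int.mod_eq_zero_iff_dvd _ _).mp hm
      have hdvdN : p ∣ s.length := by exact_mod_cast hdvd
      obtain ⟨r, hr⟩ := hdvdN
      have hlen : s.length = r * p := by rw [hr, Nat.mul_comm]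
      have hrpos : 1 ≤ r := by
        by_contra hcon
        have hr0 : r = 0 := by omega
        rw [hr0, Nat.zero_mul] at hlen
        omega
      have hfd : PySem.Int.floordiv (s.length : Int) (p : Int) = ((s.length / p : Nat) : Int) :=
        PySem.Int.floordiv_natCast _ _
      have hdivr : s.length / p = r := by rw [hlen, Nat.mul_div_cancel _ (by omega)]
      have hpat : PySem.List.slice s none (some (p : Int)) = s.take p :=
        PySem.List.slice_to_natCast _ _
      have h0 : pvVerifyA s (s.take p) (p : Int) (PySem.List.pyRange 0 (r : Int) 1) =
          pvVerifyA s (s.take p) (p : Int) (PySem.List.pyRange 1 (r : Int) 1) := by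
        rw [PySem.List.pyRange_one_cons (by exact_mod_cast hrpos)]
        simp only [pvVerifyA]
        rw [if_neg (by
          norm_num [PySem.List.slice_to_natCast]
          )]
        norm_num
      have hchar : (pvVerifyA s (s.take p) (p : Int) (PySem.List.pyRange 1 (r : Int) 1) = true) ↔
          s = (List.replicate r (s.take p)).flatten := by
        rw [← h0]
        have := pv_verify_iff s p r 0 hlen (by omega)
        simpa using this
      have hsc : (p : Int) * ((s.length / p : Nat) : Int) = (s.length : Int) := by
        rw [hdivr]
        have : (s.length : Int) = ((r * p : Nat) : Int) := by exact_mod_cast hlen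
        rw [this]
        push_cast
        ring
      have hstep : pvStepA s ((none : Option (List Int)), (0 : Int)) (p : Int) =
          (if s = (List.replicate r (s.take p)).flatten
           then ((some (s.take p) : Option (List Int)), ((s.length : Int)))
           else ((none : Option (List Int)), (0 : Int))) := by
        unfold pvStepA
        rw [if_neg (by simpa using hm)]
        simp only [hfd, hdivr, hpat]
        by_cases hmt : s = (List.replicate r (s.take p)).flatten
        · rw [if_pos (hchar.mpr hmt), if_pos hmt]
          have hpos : ((p : Int) * ((r : Nat) : Int)) > (((none : Option (List Int)), (0 : Int)) : Option (List Int) × Int).2 := by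
            have : 0 < p * r := by positivity
            have := hsc
            rw [hdivr] at this
            simp only []
            omega
          rw [if_pos hpos]
          have := hsc
          rw [hdivr] at this
          rw [this]
        · rw [if_neg (fun hc => hmt (hchar.mp hc)), if_neg hmt]
      have hBcond : ((PySem.Int.mod (s.length : Int) (p : Int) == 0) &&
          ((List.replicate (PySem.Int.floordiv (s.length : Int) (p : Int)).toNat
            (PySem.List.slice s none (some (p : Int)))).flatten == s)) =
          decide (s = (List.replicate r (s.take p)).flatten) := by
        rw [hfd, hdivr, hpat, hm]
        by_cases hq : s = (List.replicate r (s.take p)).flatten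
        · rw [decide_eq_true hq]
          simp [hq.symm]
        · rw [decide_eq_false hq]
          have hq' : ¬(List.replicate r (s.take p)).flatten = s := fun h => hq h.symm
          simp [hq']
      rw [hBcond, hstep]
      by_cases hmt : s = (List.replicate r (s.take p)).flatten
      · rw [if_pos hmt, if_pos (decide_eq_true hmt)]
        rw [pv_stay s (s.take p) rest (fun q hq => by have := hrest q hq; omega)]
        rw [hpat]
      · rw [if_neg hmt, if_neg (fun hc => hmt (of_decide_eq_true hc))]
        exact ih hrest
    · rw [show pvStepA s ((none : Option (List Int)), (0 : Int)) pl = (none, 0) by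
        unfold pvStepA; rw [if_pos hm]]
      rw [if_neg (by simp [hm])]
      exact ih hrest

-- ===== VERDICT (by name: the statement is the Claim_ definition above) =====
theorem detect_repeating_pattern_spec : Claim_equal_detect_repeating_pattern := by
  intro s _
  unfold Spec_detect_repeating_pattern detect_repeating_pattern detect_repeating_pattern_alt
  simp only [min_comm]
  apply pv_main
  intro pl hpl
  rw [PySem.List.mem_pyRange_one] at hpl
  omega
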